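-- pv_equiv track=rewrite | github.com/Yurlungur/advent-of-code | 2025/day2.py | check_is_repeat
-- ===== SOURCE A (Python) =====
-- def check_is_repeat(key, pattern):
--     if len(key) % len(pattern) != 0:
--         return False
--     multiplicity = len(key) // len(pattern)
--     for i in range(0, multiplicity):
--         if key[i*len(pattern):(i+1)*len(pattern)] != pattern:
--             return False
--     return True
-- ===== SOURCE B (Python) =====
-- def check_is_repeat(key, pattern):
--     if len(key) % len(pattern) != 0:
--         return False
--     return key == pattern * (len(key) // len(pattern))
-- ===== Notes on version B (the rewrite author's own statement) =====
-- stated objective: simpler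
-- what changed: Replaces the loop over pattern-length slices with one construction of the repeated string and a single whole-string comparison (the divisibility guard is kept, so the empty-pattern ZeroDivisionError is preserved and excluded by Pre_).
import Mathlib
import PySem

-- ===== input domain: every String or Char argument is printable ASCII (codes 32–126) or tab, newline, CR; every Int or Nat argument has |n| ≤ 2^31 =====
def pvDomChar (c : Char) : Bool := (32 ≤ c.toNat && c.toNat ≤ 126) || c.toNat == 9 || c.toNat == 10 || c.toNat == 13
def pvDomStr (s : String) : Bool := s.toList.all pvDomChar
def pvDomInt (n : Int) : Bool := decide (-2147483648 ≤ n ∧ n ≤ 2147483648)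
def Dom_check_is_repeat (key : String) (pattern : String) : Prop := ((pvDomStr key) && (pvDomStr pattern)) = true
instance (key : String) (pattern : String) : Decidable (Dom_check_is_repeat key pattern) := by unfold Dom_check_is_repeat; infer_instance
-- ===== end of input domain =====

-- B builds the repeated string once and compares it whole, instead of A's loop over pattern-length slices; objective: simpler.
-- ===== PORT A =====
-- the for-loop over range(0, multiplicity) with early 'return False'
def pvCheckLoop (kl pl : List Char) (m : Int) : List Int → Bool
  | [] => true
  | i :: rest =>
    if PySem.List.slice kl (some (i * m)) (some ((i + 1) * m)) ≠ pl then false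
    else pvCheckLoop kl pl m rest

def check_is_repeat (key : String) (pattern : String) : Bool :=
  let kl := key.toList
  let pl := pattern.toList
  if PySem.Int.mod (PySem.Str.len key) (PySem.Str.len pattern) ≠ 0 then false
  else
    let multiplicity := PySem.Int.floordiv (PySem.Str.len key) (PySem.Str.len pattern)
    pvCheckLoop kl pl (PySem.Str.len pattern) (PySem.List.pyRange 0 multiplicity)

-- ===== PORT B =====
def check_is_repeat_alt (key : String) (pattern : String) : Bool :=
  if PySem.Int.mod (PySem.Str.len key) (PySem.Str.len pattern) ≠ 0 then false
  else
    -- pattern * (len(key) // len(pattern)) as replicate-and-flatten on the char list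
    key.toList == (List.replicate (key.toList.length / pattern.toList.length) pattern.toList).flatten

-- ===== PRECONDITION & SPEC =====
-- Pre_ excludes only the empty pattern, on which both A and B raise ZeroDivisionError.
def Pre_check_is_repeat (key : String) (pattern : String) : Prop := pattern ≠ ""
instance (key : String) (pattern : String) : Decidable (Pre_check_is_repeat key pattern) := by unfold Pre_check_is_repeat; infer_instance
def pvWitness_check_is_repeat : String × String := ("abab", "ab")
def Spec_check_is_repeat (key : String) (pattern : String) (out : Bool) : Prop := out = check_is_repeat_alt key pattern
instance (key : String) (pattern : String) (out : Bool) : Decidable (Spec_check_is_repeat key pattern out) := by unfold Spec_check_is_repeat; infer_instance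

-- ===== CLAIM (what is proved, stated in full; the proofs are below) =====
def Claim_equal_check_is_repeat : Prop := ∀ (key : String) (pattern : String), Dom_check_is_repeat key pattern → Pre_check_is_repeat key pattern → Spec_check_is_repeat key pattern (check_is_repeat key pattern)

-- ===== LEMMAS AND PROOFS =====

-- the early-return loop is an 'all' over the index list
theorem pvCheckLoop_eq_all (kl pl : List Char) (m : Int) (is : List Int) :
    pvCheckLoop kl pl m is
      = is.all (fun i => PySem.List.slice kl (some (i * m)) (some ((i + 1) * m)) == pl) := by
  induction is with
  | nil => rfl
  | cons i rest ih =>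
    simp only [pvCheckLoop, List.all_cons, ih]
    by_cases h : PySem.List.slice kl (some (i * m)) (some ((i + 1) * m)) = pl <;> simp [h]

-- all pattern-length chunks equal the pattern iff the list is the pattern repeated
theorem pv_chunks_iff (pl : List Char) (_hm : 0 < pl.length) :
    ∀ (q : Nat) (kl : List Char), kl.length = q * pl.length →
      ((∀ j : Nat, j < q → (kl.drop (j * pl.length)).take pl.length = pl)
        ↔ kl = (List.replicate q pl).flatten) := by
  intro q
  induction q with
  | zero =>
    intro kl hlen
    have : kl = [] := List.eq_nil_of_length_eq_zero (by simpa using hlen)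
    subst this; simp
  | succ q ih =>
    intro kl hlen
    have hlen' : (kl.drop pl.length).length = q * pl.length := by
      simp [List.length_drop, hlen, Nat.succ_mul]
    have hsplit : kl = kl.take pl.length ++ kl.drop pl.length := (List.take_append_drop _ _).symm
    constructor
    · intro h
      have h0 : kl.take pl.length = pl := by simpa using h 0 (Nat.succ_pos q)
      have hrest : ∀ j : Nat, j < q →
          ((kl.drop pl.length).drop (j * pl.length)).take pl.length = pl := by
        intro j hj
        have := h (j + 1) (by omega)
        simpa [List.drop_drop, Nat.succ_mul, Nat.add_comm] using this
      have := (ih (kl.drop pl.length) hlen').mp hrest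
      calc kl = kl.take pl.length ++ kl.drop pl.length := hsplit
        _ = pl ++ (List.replicate q pl).flatten := by rw [h0, this]
        _ = (List.replicate (q + 1) pl).flatten := by simp [List.replicate_succ]
    · intro h j hj
      subst h
      have hdrop : ((List.replicate (q + 1) pl).flatten).drop (j * pl.length)
          = (List.replicate (q + 1 - j) pl).flatten := by
        induction j with
        | zero => simp
        | succ j ihj =>
          have hj' : j < q + 1 := by omega
          have hne : q + 1 - j = (q - j) + 1 := by omega
          have := ihj (by omega)
          rw [Nat.succ_mul, ← List.drop_drop, this, hne, List.replicate_succ,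
            List.flatten_cons, List.drop_left' rfl]
          have h2 : q + 1 - (j + 1) = q - j := by omega
          rw [h2]
      rw [hdrop]
      have hne : q + 1 - j = (q - j) + 1 := by omega
      rw [hne, List.replicate_succ, List.flatten_cons, List.take_left' rfl]

-- ===== VERDICT (by name: the statement is the Claim_ definition above) =====
theorem check_is_repeat_spec : Claim_equal_check_is_repeat := by
  intro key pattern _ hpre
  unfold Spec_check_is_repeat check_is_repeat check_is_repeat_alt
  have hplne : pattern.toList ≠ [] := fun h => hpre (String.toList_eq_nil_iff.mp h)
  have hm : 0 < pattern.toList.length := List.length_pos_iff.mpr hplne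
  set n := key.toList.length with hn
  set m := pattern.toList.length with hmdef
  simp only [PySem.Str.len_eq, ← hn, ← hmdef, PySem.Int.mod_natCast, PySem.Int.floordiv_natCast]
  by_cases hmod : n % m = 0
  · have hdvd : m ∣ n := Nat.dvd_of_mod_eq_zero hmod
    have hnq : n = (n / m) * m := (Nat.div_mul_cancel hdvd).symm
    simp only [hmod, Nat.cast_zero, ne_eq, not_true_eq_false, if_false]
    rw [pvCheckLoop_eq_all]
    rcases (pv_chunks_iff pattern.toList hm (n / m) key.toList hnq) with hiff
    have hall : (PySem.List.pyRange 0 ((n / m : Nat) : Int)).all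
        (fun i => PySem.List.slice key.toList (some (i * (m : Int))) (some ((i + 1) * (m : Int))) == pattern.toList) = true
        ↔ ∀ j : Nat, j < n / m → (key.toList.drop (j * m)).take m = pattern.toList := by
      rw [List.all_eq_true]
      constructor
      · intro h j hj
        have hmem : ((j : Int)) ∈ PySem.List.pyRange 0 ((n / m : Nat) : Int) :=
          PySem.List.mem_pyRange_one.mpr ⟨Int.natCast_nonneg j, by exact_mod_cast hj⟩
        have := h _ hmem
        rw [beq_iff_eq] at this
        rw [← this]
        have hcast : ((j : Int) + 1) * (m : Int) = ((j * m : Nat) : Int) + ((m : Nat) : Int) := by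
          push_cast; ring
        have hcast0 : (j : Int) * (m : Int) = ((j * m : Nat) : Int) := by push_cast; ring
        rw [hcast, hcast0, PySem.List.slice_natCast_add]
      · intro h i hmem
        rcases PySem.List.mem_pyRange_one.mp hmem with ⟨h0, h1⟩
        obtain ⟨j, rfl⟩ := Int.eq_ofNat_of_zero_le h0
        have hj : j < n / m := by exact_mod_cast h1
        rw [beq_iff_eq]
        have hcast : ((j : Int) + 1) * (m : Int) = ((j * m : Nat) : Int) + ((m : Nat) : Int) := by
          push_cast; ring
        have hcast0 : (j : Int) * (m : Int) = ((j * m : Nat) : Int) := by push_cast; ring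
        rw [hcast, hcast0, PySem.List.slice_natCast_add]
        exact h j hj
    have := hall.trans hiff
    rw [Bool.eq_iff_iff]
    simpa [beq_iff_eq] using this
  · have hnd : ¬ ((m : Int) ∣ (n : Int)) := by
      rw [Int.natCast_dvd_natCast]
      exact fun h => hmod (Nat.mod_eq_zero_of_dvd h)
    simp [hnd]
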